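-- pv_equiv track=rewrite | github.com/hamed-alemoni/CV-Parser | experience.py | __calculate_total_experience
-- ===== SOURCE A (Python) =====
-- def __calculate_total_experience(words: list[str], word_map: dict[str, int]) -> int:
--             # if two unit appear in a row return the first one
--     result: list[int] = []
--     unit_counter: int = 0
--     for i, word in enumerate(words):
--         number: int = word_map.get(word.strip(), None)
--
--         if not number:
--             continue
--
--         if number // 10 == 0:
--             unit_counter += 1
--
--         if unit_counter == 2:
--             return word_map.get(words[i - 1].strip(), None)
--
--         result.append(number)
--
--     return sum(result)
-- ===== SOURCE B (Python) =====
-- def __calculate_total_experience(words: list[str], word_map: dict[str, int]) -> int: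
--     # Recursive right-fold: go(i, units_seen) reports either the cut value
--     # (previous word's lookup at the second unit) or the sum of the valid
--     # numbers from position i onward, combined on the way back up.
--     def go(i: int, units_seen: int):
--         if i == len(words):
--             return (False, 0)
--         n = word_map.get(words[i].strip(), None)
--         if not n:
--             return go(i + 1, units_seen)
--         unit = (n // 10 == 0)
--         if unit and units_seen == 1:
--             return (True, word_map.get(words[i - 1].strip(), None))
--         stop, val = go(i + 1, units_seen + (1 if unit else 0))
--         return (stop, val if stop else n + val)
--     stop, val = go(0, 0)
--     return val
-- ===== Notes on version B (the rewrite author's own statement) =====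
-- stated objective: alternative
-- what changed: Replaces A's iterative loop with a mutable result list and counter by a recursive right-fold: a helper recurses down the word list carrying only the unit count, signals a cut (second unit) with a tagged result, and otherwise builds the sum on the way back up the recursion instead of in an accumulator list.
import Mathlib
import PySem

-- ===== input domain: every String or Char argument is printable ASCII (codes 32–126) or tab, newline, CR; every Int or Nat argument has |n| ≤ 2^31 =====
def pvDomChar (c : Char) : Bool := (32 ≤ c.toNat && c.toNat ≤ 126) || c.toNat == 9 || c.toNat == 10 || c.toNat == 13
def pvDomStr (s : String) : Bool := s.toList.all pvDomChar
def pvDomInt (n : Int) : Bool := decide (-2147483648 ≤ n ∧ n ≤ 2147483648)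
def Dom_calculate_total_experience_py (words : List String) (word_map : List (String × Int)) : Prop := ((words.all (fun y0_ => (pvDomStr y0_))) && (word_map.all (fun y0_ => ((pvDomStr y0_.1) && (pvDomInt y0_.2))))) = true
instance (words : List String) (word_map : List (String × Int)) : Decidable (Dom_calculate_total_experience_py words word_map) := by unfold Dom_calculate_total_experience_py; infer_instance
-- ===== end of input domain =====

-- B replaces A's iterative loop (mutable result list, counter, early return) by a
-- recursive right-fold with a tagged result — an alternative decomposition of the same cost.


-- shared primitive: dict.get(k, None) on the association list (first match)
def pyGetMap (m : List (String × Int)) (k : String) : Option Int :=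
  (m.find? (fun p => p.1 == k)).map (·.2)

-- shared primitive: word_map.get(words[i - 1].strip(), None); pyGet? = Python indexing
-- (none only on an IndexError, which neither Python reaches)
def prevLookup (words : List String) (m : List (String × Int)) (i : Int) : Option Int :=
  match PySem.List.pyGet? words (i - 1) with
  | some prev => pyGetMap m (PySem.Str.strip prev)
  | none => none

-- ===== PORT A =====
def pyA_loop (words : List String) (wm : List (String × Int)) :
    List (Int × String) → List Int → Int → Option Int
  | [], result, _ => some result.sum
  | (i, w) :: rest, result, uc =>
    match pyGetMap wm (PySem.Str.strip w) with
    | none => pyA_loop words wm rest result uc          -- 'if not number: continue'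
    | some n =>
      if n = 0 then pyA_loop words wm rest result uc    -- 0 is falsy too
      else
        let uc' := if PySem.Int.floordiv n 10 = 0 then uc + 1 else uc
        if uc' = 2 then prevLookup words wm i
        else pyA_loop words wm rest (result ++ [n]) uc'

def calculate_total_experience_py (words : List String) (word_map : List (String × Int)) : Option Int :=
  pyA_loop words word_map (PySem.List.enumerate words 0) [] 0

-- ===== PORT B =====
-- result of B's recursive helper go: either the cut value (second unit found)
-- or the sum of valid numbers from here on
inductive BRes where
  | cut : Option Int → BRes
  | acc : Int → BRes
deriving DecidableEq, Repr

-- go(i, units_seen): recursion over the suffix of words starting at index i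
def pyB_go (words : List String) (wm : List (String × Int)) :
    List String → Int → Int → BRes
  | [], _, _ => .acc 0
  | w :: rest, i, us =>
    match pyGetMap wm (PySem.Str.strip w) with
    | none => pyB_go words wm rest (i + 1) us
    | some n =>
      if n = 0 then pyB_go words wm rest (i + 1) us
      else
        let unit := PySem.Int.floordiv n 10 = 0
        if unit ∧ us = 1 then .cut (prevLookup words wm i)
        else
          match pyB_go words wm rest (i + 1) (us + if unit then 1 else 0) with
          | .cut v => .cut v
          | .acc s => .acc (n + s)

def calculate_total_experience_py_alt (words : List String) (word_map : List (String × Int)) : Option Int :=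
  match pyB_go words word_map words 0 0 with
  | .cut v => v
  | .acc s => some s

-- ===== PRECONDITION & SPEC =====
def Spec_calculate_total_experience_py (words : List String) (word_map : List (String × Int)) (out : Option Int) : Prop := out = calculate_total_experience_py_alt words word_map
instance (words : List String) (word_map : List (String × Int)) (out : Option Int) : Decidable (Spec_calculate_total_experience_py words word_map out) := by unfold Spec_calculate_total_experience_py; infer_instance

-- ===== CLAIM =====
def Claim_equal_calculate_total_experience_py : Prop := ∀ (words : List String) (word_map : List (String × Int)), Dom_calculate_total_experience_py words word_map → Spec_calculate_total_experience_py words word_map (calculate_total_experience_py words word_map)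

-- ===== LEMMAS AND PROOFS =====

-- invariant: A's loop over enumerate suffix i with accumulator res and counter uc
-- equals B's recursion over the suffix, with res.sum added to an acc result
theorem loop_eq_go (words : List String) (wm : List (String × Int)) :
    ∀ (suffix : List String) (i : Int) (res : List Int) (uc : Int), (uc = 0 ∨ uc = 1) →
    pyA_loop words wm (PySem.List.enumerate suffix i) res uc =
      (match pyB_go words wm suffix i uc with
       | .cut v => v
       | .acc s => some (res.sum + s)) := by
  intro suffix
  induction suffix with
  | nil => intro i res uc h; simp [PySem.List.enumerate_nil, pyA_loop, pyB_go]
  | cons w rest ih =>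
    intro i res uc h
    rw [PySem.List.enumerate_cons]
    simp only [pyA_loop, pyB_go]
    cases hg : pyGetMap wm (PySem.Str.strip w) with
    | none => exact ih (i + 1) res uc h
    | some n =>
      by_cases hn : n = 0
      · simp only [if_pos hn]; exact ih (i + 1) res uc h
      · simp only [if_neg hn]
        by_cases hu : PySem.Int.floordiv n 10 = 0
        · rcases h with h0 | h1
          · subst h0
            have hcond : ¬ (PySem.Int.floordiv n 10 = 0 ∧ (0 : Int) = 1) := by
              rintro ⟨_, hc⟩; norm_num at hc
            simp only [if_pos hu, if_neg (show ¬ ((0 : Int) + 1 = 2) by norm_num),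
              if_neg hcond]
            rw [ih (i + 1) (res ++ [n]) (0 + 1) (Or.inr (by norm_num))]
            cases pyB_go words wm rest (i + 1) (0 + 1) with
            | cut v => simp
            | acc s => simp [List.sum_append]; ring
          · subst h1
            have hu' : n / 10 = 0 := (PySem.Int.floordiv_eq_ediv_of_pos (by norm_num)).symm.trans hu
            simp [hu']
        · have hcond : ¬ (PySem.Int.floordiv n 10 = 0 ∧ uc = 1) := by
            rintro ⟨hc, _⟩; exact hu hc
          have h2 : uc ≠ 2 := by rcases h with h | h <;> simp [h]
          simp only [if_neg hu, if_neg h2, if_neg hcond, add_zero]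
          rw [ih (i + 1) (res ++ [n]) uc h]
          cases pyB_go words wm rest (i + 1) uc with
          | cut v => simp
          | acc s => simp [List.sum_append]; ring

-- ===== VERDICT =====
theorem calculate_total_experience_py_spec : Claim_equal_calculate_total_experience_py := by
  intro words word_map _
  unfold Spec_calculate_total_experience_py
  unfold calculate_total_experience_py calculate_total_experience_py_alt
  rw [loop_eq_go words word_map words 0 [] 0 (Or.inl rfl)]
  simp
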